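-- pv_equiv track=rewrite | github.com/akha-security/akha-xss | akha/payloads/encoder.py | html_hex_encode
-- ===== SOURCE A (Python) =====
-- _XSS_CHARS = {
--     '<': {'html': '&lt;', 'hex': '&#x3C;', 'dec': '&#60;', 'url': '%3C', 'unicode': '\\u003c', 'octal': '\\074'},
--     '>': {'html': '&gt;', 'hex': '&#x3E;', 'dec': '&#62;', 'url': '%3E', 'unicode': '\\u003e', 'octal': '\\076'},
--     '"': {'html': '&quot;', 'hex': '&#x22;', 'dec': '&#34;', 'url': '%22', 'unicode': '\\u0022', 'octal': '\\042'},
--     "'": {'html': '&#39;', 'hex': '&#x27;', 'dec': '&#39;', 'url': '%27', 'unicode': '\\u0027', 'octal': '\\047'},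
--     '(': {'html': '&#40;', 'hex': '&#x28;', 'dec': '&#40;', 'url': '%28', 'unicode': '\\u0028', 'octal': '\\050'},
--     ')': {'html': '&#41;', 'hex': '&#x29;', 'dec': '&#41;', 'url': '%29', 'unicode': '\\u0029', 'octal': '\\051'},
--     '/': {'html': '&#47;', 'hex': '&#x2F;', 'dec': '&#47;', 'url': '%2F', 'unicode': '\\u002f', 'octal': '\\057'},
--     ' ': {'html': '&#32;', 'hex': '&#x20;', 'dec': '&#32;', 'url': '%20', 'unicode': '\\u0020', 'octal': '\\040'},
--     '=': {'html': '&#61;', 'hex': '&#x3D;', 'dec': '&#61;', 'url': '%3D', 'unicode': '\\u003d', 'octal': '\\075'},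
-- }
--
-- def html_hex_encode(payload: str) -> str:
--     """Replace XSS chars with hex HTML entities (&#xNN;)."""
--     out = []
--     for ch in payload:
--         if ch in _XSS_CHARS:
--             out.append(_XSS_CHARS[ch]['hex'])
--         else:
--             out.append(ch)
--     return ''.join(out)
-- ===== SOURCE B (Python) =====
-- _HEX = {
--     '<': '&#x3C;', '>': '&#x3E;', '"': '&#x22;', "'": '&#x27;',
--     '(': '&#x28;', ')': '&#x29;', '/': '&#x2F;', ' ': '&#x20;', '=': '&#x3D;',
-- }
--
-- def html_hex_encode(payload: str) -> str:
--     """Replace XSS chars with hex HTML entities (&#xNN;)."""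
--     result = payload
--     for ch, hexval in _HEX.items():
--         result = result.replace(ch, hexval)
--     return result
-- ===== Notes on version B (the rewrite author's own statement) =====
-- stated objective: idiomatic
-- what changed: A does one left-to-right pass accumulating per-character entity strings and joining them; B instead runs nine chained str.replace full-string scans, one per mapped character (order-independent because no hex entity contains a mapped character).
import Mathlib
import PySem

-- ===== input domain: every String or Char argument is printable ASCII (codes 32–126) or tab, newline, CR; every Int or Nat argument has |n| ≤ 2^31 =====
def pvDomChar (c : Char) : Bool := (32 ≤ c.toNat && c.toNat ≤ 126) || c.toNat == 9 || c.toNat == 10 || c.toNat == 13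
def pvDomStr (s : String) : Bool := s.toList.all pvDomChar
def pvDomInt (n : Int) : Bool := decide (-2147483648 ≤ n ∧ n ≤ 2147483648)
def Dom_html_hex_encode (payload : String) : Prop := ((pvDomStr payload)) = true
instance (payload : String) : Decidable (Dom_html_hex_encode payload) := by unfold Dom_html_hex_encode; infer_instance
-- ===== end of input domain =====

-- B replaces A's single accumulate-and-join pass by chained str.replace scans, one per mapped
-- character (idiomatic; same result because no hex entity contains a mapped character).

-- ===== PORT A =====
-- the module constant _XSS_CHARS
def pvXssChars : PySem.Dict Char (PySem.Dict String String) := PySem.Dict.mk [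
  ('<',  PySem.Dict.mk [("html","&lt;"),("hex","&#x3C;"),("dec","&#60;"),("url","%3C"),("unicode","\\u003c"),("octal","\\074")]),
  ('>',  PySem.Dict.mk [("html","&gt;"),("hex","&#x3E;"),("dec","&#62;"),("url","%3E"),("unicode","\\u003e"),("octal","\\076")]),
  ('"',  PySem.Dict.mk [("html","&quot;"),("hex","&#x22;"),("dec","&#34;"),("url","%22"),("unicode","\\u0022"),("octal","\\042")]),
  ('\'', PySem.Dict.mk [("html","&#39;"),("hex","&#x27;"),("dec","&#39;"),("url","%27"),("unicode","\\u0027"),("octal","\\047")]),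
  ('(',  PySem.Dict.mk [("html","&#40;"),("hex","&#x28;"),("dec","&#40;"),("url","%28"),("unicode","\\u0028"),("octal","\\050")]),
  (')',  PySem.Dict.mk [("html","&#41;"),("hex","&#x29;"),("dec","&#41;"),("url","%29"),("unicode","\\u0029"),("octal","\\051")]),
  ('/',  PySem.Dict.mk [("html","&#47;"),("hex","&#x2F;"),("dec","&#47;"),("url","%2F"),("unicode","\\u002f"),("octal","\\057")]),
  (' ',  PySem.Dict.mk [("html","&#32;"),("hex","&#x20;"),("dec","&#32;"),("url","%20"),("unicode","\\u0020"),("octal","\\040")]),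
  ('=',  PySem.Dict.mk [("html","&#61;"),("hex","&#x3D;"),("dec","&#61;"),("url","%3D"),("unicode","\\u003d"),("octal","\\075")])]

-- A's loop body: `_XSS_CHARS[ch]['hex'] if ch in _XSS_CHARS else ch`
def pvAEnc (ch : Char) : String :=
  match pvXssChars.get? ch with
  | some m => m.getD "hex" ""
  | none   => String.ofList [ch]

def html_hex_encode (payload : String) : String :=
  let out : List String := payload.toList.foldl (fun out ch => out ++ [pvAEnc ch]) []
  PySem.Str.join "" out

-- ===== PORT B =====
-- the module constant _HEX of Source B, in insertion order
def pvHexPairs : List (String × String) :=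
  [("<","&#x3C;"), (">","&#x3E;"), ("\"","&#x22;"), ("'","&#x27;"),
   ("(","&#x28;"), (")","&#x29;"), ("/","&#x2F;"), (" ","&#x20;"), ("=","&#x3D;")]

def html_hex_encode_alt (payload : String) : String :=
  pvHexPairs.foldl (fun result p => PySem.Str.replace result p.1 p.2) payload

-- ===== PRECONDITION & SPEC =====
def Spec_html_hex_encode (payload : String) (out : String) : Prop := out = html_hex_encode_alt payload
instance (payload : String) (out : String) : Decidable (Spec_html_hex_encode payload out) := by unfold Spec_html_hex_encode; infer_instance

-- ===== CLAIM (what is proved, stated in full; the proofs are below) =====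
def Claim_equal_html_hex_encode : Prop := ∀ (payload : String), Dom_html_hex_encode payload → Spec_html_hex_encode payload (html_hex_encode payload)

-- ===== LEMMAS AND PROOFS =====

-- the 9 mappings of B, at the character-list level
def pvCharPairs : List (Char × List Char) :=
  [('<',"&#x3C;".toList), ('>',"&#x3E;".toList), ('"',"&#x22;".toList), ('\'',"&#x27;".toList),
   ('(',"&#x28;".toList), (')',"&#x29;".toList), ('/',"&#x2F;".toList), (' ',"&#x20;".toList), ('=',"&#x3D;".toList)]

-- first-match encoding of one character through a pair list
def pvEncWith : List (Char × List Char) → Char → List Char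
  | [], d => [d]
  | (c, r) :: ps, d => if d = c then r else pvEncWith ps d

theorem pvEncWith_not_key (ps : List (Char × List Char)) (d : Char)
    (h : d ∉ ps.map Prod.fst) : pvEncWith ps d = [d] := by
  induction ps with
  | nil => rfl
  | cons p ps ih =>
    obtain ⟨c, r⟩ := p
    simp only [List.map_cons, List.mem_cons, not_or] at h
    simp [pvEncWith, h.1, ih h.2]

theorem pvFlatMap_encWith_fixed (ps : List (Char × List Char)) (r : List Char)
    (h : ∀ e ∈ r, e ∉ ps.map Prod.fst) : r.flatMap (pvEncWith ps) = r := by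
  induction r with
  | nil => rfl
  | cons e r ih =>
    simp only [List.flatMap_cons]
    rw [pvEncWith_not_key ps e (h e (List.mem_cons_self)),
        ih (fun x hx => h x (List.mem_cons_of_mem _ hx))]
    rfl

-- single-character replacement is a per-character flatMap
theorem pvReplace_go_single (c : Char) (r : List Char) :
    ∀ (l acc : List Char),
      PySem.Chars.replace.go [c] r l.length l acc
        = acc.reverse ++ l.flatMap (fun d => if d = c then r else [d]) := by
  intro l
  induction l with
  | nil => intro acc; simp [PySem.Chars.replace.go]
  | cons c' t ih =>
    intro acc
    show PySem.Chars.replace.go [c] r (t.length + 1) (c' :: t) acc = _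
    by_cases h : c' = c
    · subst h
      have hp : [c'].isPrefixOf (c' :: t) = true := by simp [List.isPrefixOf]
      simp only [PySem.Chars.replace.go, hp, if_true, List.length_cons, List.drop_succ_cons,
        List.length_nil, List.drop_zero]
      rw [ih (r.reverse ++ acc)]
      simp
    · have hp : [c].isPrefixOf (c' :: t) = false := by
        simp [List.isPrefixOf, Ne.symm h]
      simp only [PySem.Chars.replace.go, hp]
      rw [ih (c' :: acc)]
      simp [h]

theorem pvReplace_single (s : List Char) (c : Char) (r : List Char) :
    PySem.Chars.replace s [c] r = s.flatMap (fun d => if d = c then r else [d]) := by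
  have h := pvReplace_go_single c r s []
  simpa [PySem.Chars.replace] using h

-- the chained replaces compute the first-match per-character encoding,
-- provided no replacement string contains any key
theorem pvFoldl_replace (ps : List (Char × List Char))
    (H : ∀ p ∈ ps, ∀ e ∈ p.2, e ∉ ps.map Prod.fst) :
    ∀ s : List Char,
      ps.foldl (fun acc p => PySem.Chars.replace acc [p.1] p.2) s = s.flatMap (pvEncWith ps) := by
  induction ps with
  | nil => intro s; simp [pvEncWith]
  | cons p ps ih =>
    intro s
    obtain ⟨c, r⟩ := p
    have Hkeys : ∀ q ∈ ps, ∀ e ∈ q.2, e ∉ ps.map Prod.fst := by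
      intro q hq e he hk
      exact H q (List.mem_cons_of_mem _ hq) e he (by simp [hk])
    simp only [List.foldl_cons]
    rw [ih Hkeys, pvReplace_single, List.flatMap_assoc]
    apply List.flatMap_congr
    intro d _
    by_cases h : d = c
    · subst h
      have hr : ∀ e ∈ r, e ∉ ps.map Prod.fst := by
        intro e he hk
        exact H (d, r) (List.mem_cons_self) e he (by simp [hk])
      simp [pvEncWith, pvFlatMap_encWith_fixed ps r hr]
    · simp [pvEncWith, h]

-- lift: the String-level chained replaces of B, read on toList
theorem pvFoldl_str (ps : List (String × String)) :
    ∀ s : String,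
      (ps.foldl (fun result p => PySem.Str.replace result p.1 p.2) s).toList
        = (ps.map (fun p => (p.1.toList, p.2.toList))).foldl
            (fun acc q => PySem.Chars.replace acc q.1 q.2) s.toList := by
  induction ps with
  | nil => intro s; rfl
  | cons p ps ih =>
    intro s
    simp only [List.map_cons, List.foldl_cons]
    rw [ih, PySem.Str.toList_replace]

theorem pv_alt_toList (payload : String) :
    (html_hex_encode_alt payload).toList = payload.toList.flatMap (pvEncWith pvCharPairs) := by
  unfold html_hex_encode_alt
  rw [pvFoldl_str]
  have hmap : pvHexPairs.map (fun p => (p.1.toList, p.2.toList))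
      = pvCharPairs.map (fun p => ([p.1], p.2)) := by
    simp [pvHexPairs, pvCharPairs]
  rw [hmap, List.foldl_map]
  exact pvFoldl_replace pvCharPairs (by simp [pvCharPairs]) payload.toList

-- A's accumulation loop is a map
theorem pvFoldl_append_map (l : List Char) :
    ∀ out : List String,
      l.foldl (fun out ch => out ++ [pvAEnc ch]) out = out ++ l.map pvAEnc := by
  induction l with
  | nil => intro out; simp
  | cons c t ih => intro out; simp [List.foldl_cons, ih]

theorem pvJoin_empty : ∀ xs : List (List Char), PySem.Chars.join [] xs = xs.flatten
  | [] => by simp [PySem.Chars.join_nil]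
  | x :: xs => by
      simp only [PySem.Chars.join, List.intercalate] at *
      cases xs with
      | nil => simp
      | cons y ys =>
        have h := pvJoin_empty (y :: ys)
        simp only [PySem.Chars.join, List.intercalate] at h
        simp [h]

-- per character, A's dict lookup equals B's first-match encoding
theorem pv_perChar (ch : Char) : (pvAEnc ch).toList = pvEncWith pvCharPairs ch := by
  by_cases h1 : ch = '<'; · subst h1; decide
  by_cases h2 : ch = '>'; · subst h2; decide
  by_cases h3 : ch = '"'; · subst h3; decide
  by_cases h4 : ch = '\''; · subst h4; decide
  by_cases h5 : ch = '('; · subst h5; decide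
  by_cases h6 : ch = ')'; · subst h6; decide
  by_cases h7 : ch = '/'; · subst h7; decide
  by_cases h8 : ch = ' '; · subst h8; decide
  by_cases h9 : ch = '='; · subst h9; decide
  simp [pvAEnc, pvXssChars, PySem.Dict.get?, pvCharPairs, pvEncWith,
    beq_iff_eq, Ne.symm h1, Ne.symm h2, Ne.symm h3, Ne.symm h4, Ne.symm h5,
    Ne.symm h6, Ne.symm h7, Ne.symm h8, Ne.symm h9, h1, h2, h3, h4, h5, h6, h7, h8, h9]

theorem pv_a_toList (payload : String) :
    (html_hex_encode payload).toList = payload.toList.flatMap (pvEncWith pvCharPairs) := by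
  unfold html_hex_encode
  rw [pvFoldl_append_map payload.toList []]
  rw [PySem.Str.toList_join]
  have : ("" : String).toList = [] := rfl
  rw [this, pvJoin_empty]
  simp only [List.nil_append, List.map_map]
  have hf : payload.toList.map (fun ch => (pvAEnc ch).toList)
      = payload.toList.map (pvEncWith pvCharPairs) :=
    List.map_congr_left (fun ch _ => pv_perChar ch)
  have hcomp : (String.toList ∘ pvAEnc) = (fun ch => (pvAEnc ch).toList) := rfl
  rw [hcomp, hf, ← List.flatMap_def]

-- ===== VERDICT (by name: the statement is the Claim_ definition above) =====
theorem html_hex_encode_spec : Claim_equal_html_hex_encode := by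
  intro payload _
  show html_hex_encode payload = html_hex_encode_alt payload
  rw [← String.ofList_toList (s := html_hex_encode payload), pv_a_toList, ← pv_alt_toList,
    String.ofList_toList]
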